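-- pv_equiv track=rewrite | github.com/AdityaAdi07/Honey-Well-V2 | city.py | get_city_icao_codes
-- ===== SOURCE A (Python) =====
-- def get_city_icao_codes(cities):
--     """
--     Retrieves ICAO codes for a list of cities.  This is a placeholder
--     function.  You'll need to replace this with a real implementation
--     if you have an ICAO code database or API.
--
--     Args:
--         cities (list): A list of city names.
--
--     Returns:
--         dict: A dictionary where keys are city names and values are their ICAO codes.
--     """
--     icao_codes = {}
--     for city in cities:
--         if city == "Delhi":
--             icao_codes[city] = "VIDP"
--         elif city == "Jaipur":
--             icao_codes[city] = "VIJP"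
--         elif city == "Ahmedabad":
--             icao_codes[city] = "VAAH"
--         elif city == "Mumbai":
--             icao_codes[city] = "VABB"
--         elif city == "Kolkata":
--             icao_codes[city] = "VECC"
--         elif city == "Bhubaneswar":
--             icao_codes[city] = "VEBS"
--         elif city == "Hyderabad":
--             icao_codes[city] = "VOHY"
--         elif city == "Bangalore":
--             icao_codes[city] = "VOBL"
--         elif city == "Goa":
--             icao_codes[city] = "VOGO"
--         elif city == "Coimbatore":
--             icao_codes[city] = "VOCB"
--         elif city == "Kochi":
--             icao_codes[city] = "VOCI"
--         elif city == "Thiruvananthapuram":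
--             icao_codes[city] = "VOTV"
--         elif city == "Chennai":
--             icao_codes[city] = "VOMM"
--         elif city == "Nagpur":
--             icao_codes[city] = "VANP"
--         elif city == "Lucknow":
--             icao_codes[city] = "VILK"
--         elif city == "Pune":
--             icao_codes[city] = "VAPO"
--         elif city == "Chandigarh":
--             icao_codes[city] = "VICG"
--         elif city == "Guwahati":
--             icao_codes[city] = "VEGT"
--         elif city == "Mysuru":
--             icao_codes[city] = "VOMY"
--         elif city == "Patna":
--             icao_codes[city] = "VEPT"
--         elif city == "Bhopal":
--             icao_codes[city] = "VABP"
--         else: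
--             icao_codes[city] = "Unknown"
--     return icao_codes
-- ===== SOURCE B (Python) =====
-- # Alphabetically sorted (city, ICAO) table; looked up by hand-written binary search.
-- _TABLE = [
--     ("Ahmedabad", "VAAH"), ("Bangalore", "VOBL"), ("Bhopal", "VABP"),
--     ("Bhubaneswar", "VEBS"), ("Chandigarh", "VICG"), ("Chennai", "VOMM"),
--     ("Coimbatore", "VOCB"), ("Delhi", "VIDP"), ("Goa", "VOGO"),
--     ("Guwahati", "VEGT"), ("Hyderabad", "VOHY"), ("Jaipur", "VIJP"),
--     ("Kochi", "VOCI"), ("Kolkata", "VECC"), ("Lucknow", "VILK"),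
--     ("Mumbai", "VABB"), ("Mysuru", "VOMY"), ("Nagpur", "VANP"),
--     ("Patna", "VEPT"), ("Pune", "VAPO"), ("Thiruvananthapuram", "VOTV"),
-- ]
--
--
-- def _lookup(city):
--     lo, hi = 0, len(_TABLE)
--     while lo < hi:
--         mid = (lo + hi) // 2
--         if _TABLE[mid][0] < city:
--             lo = mid + 1
--         else:
--             hi = mid
--     if lo < len(_TABLE) and _TABLE[lo][0] == city:
--         return _TABLE[lo][1]
--     return "Unknown"
--
--
-- def get_city_icao_codes(cities):
--     # Stage 1: distinct cities in first-occurrence order (= the result's key order).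
--     order = []
--     seen = set()
--     for city in cities:
--         if city not in seen:
--             seen.add(city)
--             order.append(city)
--     # Stage 2: one binary search per distinct city.
--     return {city: _lookup(city) for city in order}
-- ===== Notes on version B (the rewrite author's own statement) =====
-- stated objective: alternative
-- what changed: B first deduplicates the cities into first-occurrence order (one staged pass with a seen-set), then resolves each distinct city once by hand-written binary search over an alphabetically sorted constant table, instead of A's single fold that runs a 22-way elif chain and a dict insert for every element.
import Mathlib
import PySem

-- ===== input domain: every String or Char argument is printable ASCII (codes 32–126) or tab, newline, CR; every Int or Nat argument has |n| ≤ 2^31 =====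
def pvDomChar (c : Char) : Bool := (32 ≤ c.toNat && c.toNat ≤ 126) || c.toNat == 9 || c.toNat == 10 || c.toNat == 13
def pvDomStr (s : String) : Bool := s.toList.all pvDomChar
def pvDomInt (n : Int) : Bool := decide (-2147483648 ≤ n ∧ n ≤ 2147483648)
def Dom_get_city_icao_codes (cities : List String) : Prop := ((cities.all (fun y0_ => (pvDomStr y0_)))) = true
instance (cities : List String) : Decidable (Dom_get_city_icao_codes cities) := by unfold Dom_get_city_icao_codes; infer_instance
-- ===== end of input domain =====

-- B stages the work differently: one dedup pass over the cities, then a hand-written binary search over an alphabetically sorted constant table for each distinct city (alternative algorithm; A runs a 22-way elif chain and a dict insert per element).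


-- ===== PORT A =====
def get_city_icao_codes (cities : List String) : List (String × String) :=
  (cities.foldl (fun icao_codes city =>
    if city == "Delhi" then icao_codes.insert city "VIDP"
    else if city == "Jaipur" then icao_codes.insert city "VIJP"
    else if city == "Ahmedabad" then icao_codes.insert city "VAAH"
    else if city == "Mumbai" then icao_codes.insert city "VABB"
    else if city == "Kolkata" then icao_codes.insert city "VECC"
    else if city == "Bhubaneswar" then icao_codes.insert city "VEBS"
    else if city == "Hyderabad" then icao_codes.insert city "VOHY"
    else if city == "Bangalore" then icao_codes.insert city "VOBL"
    else if city == "Goa" then icao_codes.insert city "VOGO"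
    else if city == "Coimbatore" then icao_codes.insert city "VOCB"
    else if city == "Kochi" then icao_codes.insert city "VOCI"
    else if city == "Thiruvananthapuram" then icao_codes.insert city "VOTV"
    else if city == "Chennai" then icao_codes.insert city "VOMM"
    else if city == "Nagpur" then icao_codes.insert city "VANP"
    else if city == "Lucknow" then icao_codes.insert city "VILK"
    else if city == "Pune" then icao_codes.insert city "VAPO"
    else if city == "Chandigarh" then icao_codes.insert city "VICG"
    else if city == "Guwahati" then icao_codes.insert city "VEGT"
    else if city == "Mysuru" then icao_codes.insert city "VOMY"
    else if city == "Patna" then icao_codes.insert city "VEPT"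
    else if city == "Bhopal" then icao_codes.insert city "VABP"
    else icao_codes.insert city "Unknown") PySem.Dict.empty).items

-- ===== PORT B =====
-- the module-level constant _TABLE, sorted alphabetically by city name
def icaoSortedTable : List (String × String) :=
  [("Ahmedabad", "VAAH"),
   ("Bangalore", "VOBL"),
   ("Bhopal", "VABP"),
   ("Bhubaneswar", "VEBS"),
   ("Chandigarh", "VICG"),
   ("Chennai", "VOMM"),
   ("Coimbatore", "VOCB"),
   ("Delhi", "VIDP"),
   ("Goa", "VOGO"),
   ("Guwahati", "VEGT"),
   ("Hyderabad", "VOHY"),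
   ("Jaipur", "VIJP"),
   ("Kochi", "VOCI"),
   ("Kolkata", "VECC"),
   ("Lucknow", "VILK"),
   ("Mumbai", "VABB"),
   ("Mysuru", "VOMY"),
   ("Nagpur", "VANP"),
   ("Patna", "VEPT"),
   ("Pune", "VAPO"),
   ("Thiruvananthapuram", "VOTV")]

-- the 'while lo < hi' loop of _lookup; indices are nonnegative so Nat is exact,
-- and the fuel hi - lo bounds the iteration count (hi - lo shrinks each iteration)
def icaoBsearchGo (city : String) : Nat → Nat → Nat → Nat
  | 0, lo, _hi => lo
  | fuel + 1, lo, hi =>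
    if lo < hi then
      let mid := (lo + hi) / 2
      if (icaoSortedTable.getD mid ("", "")).1 < city then icaoBsearchGo city fuel (mid + 1) hi
      else icaoBsearchGo city fuel lo mid
    else lo

def icaoBsearchLoop (city : String) (lo hi : Nat) : Nat :=
  icaoBsearchGo city (hi - lo) lo hi

-- _lookup(city): binary search, then the final membership check
def icaoLookup (city : String) : String :=
  let lo := icaoBsearchLoop city 0 icaoSortedTable.length
  if lo < icaoSortedTable.length then
    if (icaoSortedTable.getD lo ("", "")).1 == city then (icaoSortedTable.getD lo ("", "")).2
    else "Unknown"
  else "Unknown"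

def get_city_icao_codes_alt (cities : List String) : List (String × String) :=
  -- Stage 1: distinct cities in first-occurrence order (order, seen)
  let os := cities.foldl
    (fun (p : List String × PySem.Set String) city =>
      if p.2.contains city then p else (p.1 ++ [city], p.2.add city))
    ([], PySem.Set.empty)
  -- Stage 2: one binary search per distinct city
  (os.1.foldl (fun d city => d.insert city (icaoLookup city)) PySem.Dict.empty).items

-- ===== PRECONDITION & SPEC =====
def Spec_get_city_icao_codes (cities : List String) (out : List (String × String)) : Prop := out = get_city_icao_codes_alt cities
instance (cities : List String) (out : List (String × String)) : Decidable (Spec_get_city_icao_codes cities out) := by unfold Spec_get_city_icao_codes; infer_instance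

-- ===== CLAIM (what is proved, stated in full; the proofs are below) =====
def Claim_equal_get_city_icao_codes : Prop := ∀ (cities : List String), Dom_get_city_icao_codes cities → Spec_get_city_icao_codes cities (get_city_icao_codes cities)

-- ===== LEMMAS AND PROOFS =====

-- A's per-city value, as a function (proof-side helper)
def icaoChain (city : String) : String :=
  if city == "Delhi" then "VIDP"
  else if city == "Jaipur" then "VIJP"
  else if city == "Ahmedabad" then "VAAH"
  else if city == "Mumbai" then "VABB"
  else if city == "Kolkata" then "VECC"
  else if city == "Bhubaneswar" then "VEBS"
  else if city == "Hyderabad" then "VOHY"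
  else if city == "Bangalore" then "VOBL"
  else if city == "Goa" then "VOGO"
  else if city == "Coimbatore" then "VOCB"
  else if city == "Kochi" then "VOCI"
  else if city == "Thiruvananthapuram" then "VOTV"
  else if city == "Chennai" then "VOMM"
  else if city == "Nagpur" then "VANP"
  else if city == "Lucknow" then "VILK"
  else if city == "Pune" then "VAPO"
  else if city == "Chandigarh" then "VICG"
  else if city == "Guwahati" then "VEGT"
  else if city == "Mysuru" then "VOMY"
  else if city == "Patna" then "VEPT"
  else if city == "Bhopal" then "VABP"
  else "Unknown"

-- first-match association lookup (proof-side reference function)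
def icaoAssoc : List (String × String) → String → String
  | [], _ => "Unknown"
  | (k, v) :: t, c => if k = c then v else icaoAssoc t c

abbrev icaoKey (n : Nat) : String := (icaoSortedTable.getD n ("", "")).1

-- the 20 adjacent-order facts of the sorted table
theorem icaoLt0 : ("Ahmedabad" : String) < "Bangalore" := by
  rw [String.lt_iff_toList_lt]; decide
theorem icaoLt1 : ("Bangalore" : String) < "Bhopal" := by
  rw [String.lt_iff_toList_lt]; decide
theorem icaoLt2 : ("Bhopal" : String) < "Bhubaneswar" := by
  rw [String.lt_iff_toList_lt]; decide
theorem icaoLt3 : ("Bhubaneswar" : String) < "Chandigarh" := by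
  rw [String.lt_iff_toList_lt]; decide
theorem icaoLt4 : ("Chandigarh" : String) < "Chennai" := by
  rw [String.lt_iff_toList_lt]; decide
theorem icaoLt5 : ("Chennai" : String) < "Coimbatore" := by
  rw [String.lt_iff_toList_lt]; decide
theorem icaoLt6 : ("Coimbatore" : String) < "Delhi" := by
  rw [String.lt_iff_toList_lt]; decide
theorem icaoLt7 : ("Delhi" : String) < "Goa" := by
  rw [String.lt_iff_toList_lt]; decide
theorem icaoLt8 : ("Goa" : String) < "Guwahati" := by
  rw [String.lt_iff_toList_lt]; decide
theorem icaoLt9 : ("Guwahati" : String) < "Hyderabad" := by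
  rw [String.lt_iff_toList_lt]; decide
theorem icaoLt10 : ("Hyderabad" : String) < "Jaipur" := by
  rw [String.lt_iff_toList_lt]; decide
theorem icaoLt11 : ("Jaipur" : String) < "Kochi" := by
  rw [String.lt_iff_toList_lt]; decide
theorem icaoLt12 : ("Kochi" : String) < "Kolkata" := by
  rw [String.lt_iff_toList_lt]; decide
theorem icaoLt13 : ("Kolkata" : String) < "Lucknow" := by
  rw [String.lt_iff_toList_lt]; decide
theorem icaoLt14 : ("Lucknow" : String) < "Mumbai" := by
  rw [String.lt_iff_toList_lt]; decide
theorem icaoLt15 : ("Mumbai" : String) < "Mysuru" := by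
  rw [String.lt_iff_toList_lt]; decide
theorem icaoLt16 : ("Mysuru" : String) < "Nagpur" := by
  rw [String.lt_iff_toList_lt]; decide
theorem icaoLt17 : ("Nagpur" : String) < "Patna" := by
  rw [String.lt_iff_toList_lt]; decide
theorem icaoLt18 : ("Patna" : String) < "Pune" := by
  rw [String.lt_iff_toList_lt]; decide
theorem icaoLt19 : ("Pune" : String) < "Thiruvananthapuram" := by
  rw [String.lt_iff_toList_lt]; decide

theorem icaoAdj : ∀ i, i < 20 → icaoKey i < icaoKey (i + 1) := by
  intro i h
  interval_cases i
  · exact icaoLt0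
  · exact icaoLt1
  · exact icaoLt2
  · exact icaoLt3
  · exact icaoLt4
  · exact icaoLt5
  · exact icaoLt6
  · exact icaoLt7
  · exact icaoLt8
  · exact icaoLt9
  · exact icaoLt10
  · exact icaoLt11
  · exact icaoLt12
  · exact icaoLt13
  · exact icaoLt14
  · exact icaoLt15
  · exact icaoLt16
  · exact icaoLt17
  · exact icaoLt18
  · exact icaoLt19

theorem icaoMono (i j : Nat) (hij : i ≤ j) (hj : j ≤ 20) : icaoKey i ≤ icaoKey j := by
  induction j with
  | zero =>
    have h0 : i = 0 := by omega
    subst h0; exact le_refl _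
  | succ n ihn =>
    rcases Nat.lt_or_ge i (n + 1) with h | h
    · exact le_trans (ihn (by omega) (by omega)) (le_of_lt (icaoAdj n (by omega)))
    · have : i = n + 1 := by omega
      subst this; exact le_refl _

-- the while-loop invariant: the result r brackets city (keys below r are < city, keys from r on are not)
theorem icaoGo_spec (city : String) : ∀ (fuel lo hi : Nat), lo ≤ hi → hi ≤ 21 → hi - lo ≤ fuel →
    (∀ i, i < lo → icaoKey i < city) → (∀ i, hi ≤ i → i < 21 → ¬ icaoKey i < city) →
    (∀ i, i < icaoBsearchGo city fuel lo hi → icaoKey i < city) ∧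
    (∀ i, icaoBsearchGo city fuel lo hi ≤ i → i < 21 → ¬ icaoKey i < city) ∧
    icaoBsearchGo city fuel lo hi ≤ 21 := by
  intro fuel
  induction fuel with
  | zero =>
    intro lo hi h1 h2 h3 hlo hhi
    have he : lo = hi := by omega
    subst he
    simp only [icaoBsearchGo]
    exact ⟨hlo, hhi, by omega⟩
  | succ n ih =>
    intro lo hi h1 h2 h3 hlo hhi
    simp only [icaoBsearchGo]
    by_cases hlt : lo < hi
    · rw [if_pos hlt]
      by_cases hk : (icaoSortedTable.getD ((lo + hi) / 2) ("", "")).1 < city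
      · rw [if_pos hk]
        refine ih ((lo + hi) / 2 + 1) hi (by omega) h2 (by omega) ?_ hhi
        intro i hi2
        rcases Nat.lt_or_ge i lo with h | h
        · exact hlo i h
        · exact lt_of_le_of_lt (icaoMono i ((lo + hi) / 2) (by omega) (by omega)) hk
      · rw [if_neg hk]
        refine ih lo ((lo + hi) / 2) (by omega) (by omega) (by omega) hlo ?_
        intro i hmidle hi21 hcon
        exact hk (lt_of_le_of_lt (icaoMono ((lo + hi) / 2) i hmidle (by omega)) hcon)
    · rw [if_neg hlt]
      exact ⟨hlo, fun i hle hlt2 => hhi i (by omega) hlt2, by omega⟩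

theorem icaoAssoc_none (T : List (String × String)) (c : String)
    (h : ∀ i, i < T.length → (T.getD i ("", "")).1 ≠ c) : icaoAssoc T c = "Unknown" := by
  induction T with
  | nil => rfl
  | cons p t ih =>
    obtain ⟨k, v⟩ := p
    have h0 : k ≠ c := by have := h 0 (by simp); simpa using this
    simp only [icaoAssoc, if_neg h0]
    exact ih (fun i hi => by have := h (i + 1) (by simp; omega); simpa using this)

theorem icaoAssoc_at (T : List (String × String)) (c : String) : ∀ (i : Nat), i < T.length →
    (T.getD i ("", "")).1 = c → (∀ j, j < i → (T.getD j ("", "")).1 ≠ c) →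
    icaoAssoc T c = (T.getD i ("", "")).2 := by
  induction T with
  | nil => intro i hi; simp at hi
  | cons p t ih =>
    intro i hi heq hprev
    obtain ⟨k, v⟩ := p
    cases i with
    | zero =>
      simp only [List.getD_cons_zero] at heq ⊢
      simp [icaoAssoc, heq]
    | succ n =>
      have h0 : k ≠ c := by have := hprev 0 (by omega); simpa using this
      simp only [icaoAssoc, if_neg h0, List.getD_cons_succ]
      exact ih n (by simpa using hi) (by simpa using heq)
        (fun j hj => by have := hprev (j + 1) (by omega); simpa using this)

theorem icaoLookup_eq_assoc (city : String) : icaoLookup city = icaoAssoc icaoSortedTable city := by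
  obtain ⟨hlo, hhi, hle⟩ := icaoGo_spec city 21 0 21 (by omega) (by omega) (by omega)
    (fun i h => absurd h (by omega))
    (fun i h1 h2 => absurd (Nat.lt_of_le_of_lt h1 h2) (lt_irrefl _))
  simp only [icaoLookup, icaoBsearchLoop, show icaoSortedTable.length = 21 from rfl, Nat.sub_zero]
  by_cases hr : icaoBsearchGo city 21 0 21 < 21
  · rw [if_pos hr]
    by_cases h2 : (icaoSortedTable.getD (icaoBsearchGo city 21 0 21) ("", "")).1 = city
    · rw [if_pos (by simpa using h2)]
      exact (icaoAssoc_at icaoSortedTable city (icaoBsearchGo city 21 0 21) hr h2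
        (fun j hj => (hlo j hj).ne)).symm
    · rw [if_neg (by simpa using h2)]
      refine (icaoAssoc_none icaoSortedTable city ?_).symm
      intro i hi
      rcases Nat.lt_trichotomy i (icaoBsearchGo city 21 0 21) with h | h | h
      · exact (hlo i h).ne
      · exact h ▸ h2
      · intro he
        have hcr : city < icaoKey (icaoBsearchGo city 21 0 21) :=
          lt_of_le_of_ne (not_lt.mp (hhi _ (le_refl _) hr)) (fun e => h2 e.symm)
        have hi21 : i < 21 := hi
        have hmono : icaoKey (icaoBsearchGo city 21 0 21) ≤ icaoKey i :=
          icaoMono _ i (by omega) (by omega)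
        have hlt : city < icaoKey i := lt_of_lt_of_le hcr hmono
        have he' : icaoKey i = city := he
        rw [he'] at hlt
        exact lt_irrefl city hlt
  · rw [if_neg hr]
    refine (icaoAssoc_none icaoSortedTable city ?_).symm
    intro i hi
    have hi21 : i < 21 := hi
    exact (hlo i (by omega)).ne

theorem icaoChain_eq_assoc (city : String) : icaoChain city = icaoAssoc icaoSortedTable city := by
  by_cases h1 : city = "Delhi"
  · subst h1; simp [icaoChain, icaoAssoc, icaoSortedTable]
  by_cases h2 : city = "Jaipur"
  · subst h2; simp [icaoChain, icaoAssoc, icaoSortedTable]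
  by_cases h3 : city = "Ahmedabad"
  · subst h3; simp [icaoChain, icaoAssoc, icaoSortedTable]
  by_cases h4 : city = "Mumbai"
  · subst h4; simp [icaoChain, icaoAssoc, icaoSortedTable]
  by_cases h5 : city = "Kolkata"
  · subst h5; simp [icaoChain, icaoAssoc, icaoSortedTable]
  by_cases h6 : city = "Bhubaneswar"
  · subst h6; simp [icaoChain, icaoAssoc, icaoSortedTable]
  by_cases h7 : city = "Hyderabad"
  · subst h7; simp [icaoChain, icaoAssoc, icaoSortedTable]
  by_cases h8 : city = "Bangalore"
  · subst h8; simp [icaoChain, icaoAssoc, icaoSortedTable]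
  by_cases h9 : city = "Goa"
  · subst h9; simp [icaoChain, icaoAssoc, icaoSortedTable]
  by_cases h10 : city = "Coimbatore"
  · subst h10; simp [icaoChain, icaoAssoc, icaoSortedTable]
  by_cases h11 : city = "Kochi"
  · subst h11; simp [icaoChain, icaoAssoc, icaoSortedTable]
  by_cases h12 : city = "Thiruvananthapuram"
  · subst h12; simp [icaoChain, icaoAssoc, icaoSortedTable]
  by_cases h13 : city = "Chennai"
  · subst h13; simp [icaoChain, icaoAssoc, icaoSortedTable]
  by_cases h14 : city = "Nagpur"
  · subst h14; simp [icaoChain, icaoAssoc, icaoSortedTable]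
  by_cases h15 : city = "Lucknow"
  · subst h15; simp [icaoChain, icaoAssoc, icaoSortedTable]
  by_cases h16 : city = "Pune"
  · subst h16; simp [icaoChain, icaoAssoc, icaoSortedTable]
  by_cases h17 : city = "Chandigarh"
  · subst h17; simp [icaoChain, icaoAssoc, icaoSortedTable]
  by_cases h18 : city = "Guwahati"
  · subst h18; simp [icaoChain, icaoAssoc, icaoSortedTable]
  by_cases h19 : city = "Mysuru"
  · subst h19; simp [icaoChain, icaoAssoc, icaoSortedTable]
  by_cases h20 : city = "Patna"
  · subst h20; simp [icaoChain, icaoAssoc, icaoSortedTable]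
  by_cases h21 : city = "Bhopal"
  · subst h21; simp [icaoChain, icaoAssoc, icaoSortedTable]
  have g1 : "Delhi" ≠ city := fun e => h1 e.symm
  have g2 : "Jaipur" ≠ city := fun e => h2 e.symm
  have g3 : "Ahmedabad" ≠ city := fun e => h3 e.symm
  have g4 : "Mumbai" ≠ city := fun e => h4 e.symm
  have g5 : "Kolkata" ≠ city := fun e => h5 e.symm
  have g6 : "Bhubaneswar" ≠ city := fun e => h6 e.symm
  have g7 : "Hyderabad" ≠ city := fun e => h7 e.symm
  have g8 : "Bangalore" ≠ city := fun e => h8 e.symm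
  have g9 : "Goa" ≠ city := fun e => h9 e.symm
  have g10 : "Coimbatore" ≠ city := fun e => h10 e.symm
  have g11 : "Kochi" ≠ city := fun e => h11 e.symm
  have g12 : "Thiruvananthapuram" ≠ city := fun e => h12 e.symm
  have g13 : "Chennai" ≠ city := fun e => h13 e.symm
  have g14 : "Nagpur" ≠ city := fun e => h14 e.symm
  have g15 : "Lucknow" ≠ city := fun e => h15 e.symm
  have g16 : "Pune" ≠ city := fun e => h16 e.symm
  have g17 : "Chandigarh" ≠ city := fun e => h17 e.symm
  have g18 : "Guwahati" ≠ city := fun e => h18 e.symm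
  have g19 : "Mysuru" ≠ city := fun e => h19 e.symm
  have g20 : "Patna" ≠ city := fun e => h20 e.symm
  have g21 : "Bhopal" ≠ city := fun e => h21 e.symm
  simp [icaoChain, icaoAssoc, icaoSortedTable, h1, h2, h3, h4, h5, h6, h7, h8, h9, h10, h11, h12, h13, h14, h15, h16, h17, h18, h19, h20, h21, g1, g2, g3, g4, g5, g6, g7, g8, g9, g10, g11, g12, g13, g14, g15, g16, g17, g18, g19, g20, g21]

theorem icaoChain_eq_lookup (city : String) : icaoChain city = icaoLookup city :=
  (icaoChain_eq_assoc city).trans (icaoLookup_eq_assoc city).symm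

-- lookup of a foldl-insert with a value that only depends on the key
theorem get?_foldl_insert (f : String → String) (l : List String) (d : PySem.Dict String String) (c : String) :
    (l.foldl (fun d x => d.insert x (f x)) d).get? c = if c ∈ l then some (f c) else d.get? c := by
  induction l generalizing d with
  | nil => simp
  | cons x xs ih =>
    simp only [List.foldl_cons, ih, List.mem_cons]
    by_cases hx : c ∈ xs
    · simp [hx]
    · by_cases hc : c = x
      · subst hc; simp [hx, PySem.Dict.get?_insert_self]
      · simp [hx, hc, PySem.Dict.get?_insert_of_ne _ _ hc]

-- the items of the A-side fold: distinct cities in first-occurrence order, each paired with f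
theorem items_foldl_insert_eq (f : String → String) (l : List String) :
    (l.foldl (fun d x => d.insert x (f x)) PySem.Dict.empty).items
      = (PySem.List.dedup l).map (fun c => (c, f c)) := by
  have hkeys : (l.foldl (fun d x => d.insert x (f x)) PySem.Dict.empty).keys = PySem.List.dedup l := by
    rw [PySem.Dict.keys_foldl_insert]
    simp [PySem.Set.update, PySem.Dict.keys_empty, PySem.List.dedup_eq_ofList, PySem.Set.ofList]
  have hnd : (l.foldl (fun d x => d.insert x (f x)) PySem.Dict.empty).keys.Nodup :=
    PySem.Dict.nodup_keys_foldl_insert l _ _ (by simp [PySem.Dict.keys_empty])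
  rw [PySem.Dict.items_eq_map_keys _ hnd "", hkeys]
  apply List.map_congr_left
  intro c hc
  have hcl : c ∈ l := (PySem.List.mem_dedup l c).1 hc
  have hg := get?_foldl_insert f l PySem.Dict.empty c
  rw [if_pos hcl] at hg
  simp [PySem.Dict.getD_eq_get?_getD, hg]

-- stage 1 of B computes dedup: the running order list equals the running seen set
theorem stage1_step (s : PySem.Set String) (x : String) :
    (if (s, s).2.contains x = true then ((s, s) : List String × PySem.Set String)
     else ((s, s).1 ++ [x], (s, s).2.add x)) = (PySem.Set.add s x, PySem.Set.add s x) := by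
  by_cases hx : x ∈ s
  · simp [hx]
  · simp [hx]

theorem stage1_go (l : List String) : ∀ (s : PySem.Set String),
    (l.foldl (fun (p : List String × PySem.Set String) city =>
        if p.2.contains city then p else (p.1 ++ [city], p.2.add city)) (s, s))
      = (l.foldl (fun s c => PySem.Set.add s c) s, l.foldl (fun s c => PySem.Set.add s c) s) := by
  induction l with
  | nil => intro s; rfl
  | cons x xs ih =>
    intro s
    simp only [List.foldl_cons]
    rw [stage1_step s x]
    exact ih (PySem.Set.add s x)

theorem stage1_eq_dedup (l : List String) :
    (l.foldl (fun (p : List String × PySem.Set String) city =>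
        if p.2.contains city then p else (p.1 ++ [city], p.2.add city))
      ([], PySem.Set.empty)).1 = PySem.List.dedup l := by
  rw [show (([], PySem.Set.empty) : List String × PySem.Set String)
        = ((PySem.Set.empty : PySem.Set String), (PySem.Set.empty : PySem.Set String)) from rfl,
      stage1_go l PySem.Set.empty]
  rw [PySem.List.dedup_eq_ofList, PySem.Set.ofList_eq_foldl]
  rfl

-- dedup is idempotent
theorem dedup_dedup (l : List String) :
    PySem.List.dedup (PySem.List.dedup l) = PySem.List.dedup l := by
  rw [PySem.List.dedup_eq_ofList (PySem.List.dedup l)]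
  exact PySem.Set.ofList_eq_self_of_nodup _ (PySem.List.nodup_dedup l)

-- ===== VERDICT (by name: the statement is the Claim_ definition above) =====
theorem get_city_icao_codes_spec : Claim_equal_get_city_icao_codes := by
  intro cities _
  show get_city_icao_codes cities = get_city_icao_codes_alt cities
  unfold get_city_icao_codes get_city_icao_codes_alt
  have hA : (fun (d : PySem.Dict String String) city =>
      if city == "Delhi" then d.insert city "VIDP"
      else if city == "Jaipur" then d.insert city "VIJP"
      else if city == "Ahmedabad" then d.insert city "VAAH"
      else if city == "Mumbai" then d.insert city "VABB"
      else if city == "Kolkata" then d.insert city "VECC"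
      else if city == "Bhubaneswar" then d.insert city "VEBS"
      else if city == "Hyderabad" then d.insert city "VOHY"
      else if city == "Bangalore" then d.insert city "VOBL"
      else if city == "Goa" then d.insert city "VOGO"
      else if city == "Coimbatore" then d.insert city "VOCB"
      else if city == "Kochi" then d.insert city "VOCI"
      else if city == "Thiruvananthapuram" then d.insert city "VOTV"
      else if city == "Chennai" then d.insert city "VOMM"
      else if city == "Nagpur" then d.insert city "VANP"
      else if city == "Lucknow" then d.insert city "VILK"
      else if city == "Pune" then d.insert city "VAPO"
      else if city == "Chandigarh" then d.insert city "VICG"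
      else if city == "Guwahati" then d.insert city "VEGT"
      else if city == "Mysuru" then d.insert city "VOMY"
      else if city == "Patna" then d.insert city "VEPT"
      else if city == "Bhopal" then d.insert city "VABP"
      else d.insert city "Unknown")
      = (fun (d : PySem.Dict String String) city => d.insert city (icaoChain city)) := by
    funext d city
    simp only [icaoChain, apply_ite (d.insert city)]
  rw [hA, items_foldl_insert_eq icaoChain cities]
  simp only [stage1_eq_dedup]
  rw [items_foldl_insert_eq icaoLookup (PySem.List.dedup cities), dedup_dedup]
  exact List.map_congr_left fun c _ => by rw [icaoChain_eq_lookup]
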